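-- pv_equiv track=rewrite | github.com/EdwinOsorioJuaquin/algoritmos_evolutivos_s08 | Actividad05/visualizacion.py | decodificar_binario
-- ===== SOURCE A (Python) =====
-- def decodificar_binario(crom):
--     asignaciones = {'A': [], 'B': [], 'C': []}
--     for i in range(39):
--         bits = crom[i*2:i*2+2]
--         if bits == [1, 0]:
--             asignaciones['A'].append(i)
--         elif bits == [0, 1]:
--             asignaciones['B'].append(i)
--         else:
--             asignaciones['C'].append(i)
--     return asignaciones
-- ===== SOURCE B (Python) =====
-- def decodificar_binario(crom):
--     return {
--         'A': [i for i in range(39) if crom[2*i:2*i+2] == [1, 0]],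
--         'B': [i for i in range(39) if crom[2*i:2*i+2] == [0, 1]],
--         'C': [i for i in range(39)
--               if crom[2*i:2*i+2] != [1, 0] and crom[2*i:2*i+2] != [0, 1]],
--     }
-- ===== Notes on version B (the rewrite author's own statement) =====
-- stated objective: alternative
-- what changed: Replaces the single interleaved loop that mutates a three-key dict with three independent filtering comprehensions over range(39), one per bucket, assembled into the dict in one return.
import Mathlib
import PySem

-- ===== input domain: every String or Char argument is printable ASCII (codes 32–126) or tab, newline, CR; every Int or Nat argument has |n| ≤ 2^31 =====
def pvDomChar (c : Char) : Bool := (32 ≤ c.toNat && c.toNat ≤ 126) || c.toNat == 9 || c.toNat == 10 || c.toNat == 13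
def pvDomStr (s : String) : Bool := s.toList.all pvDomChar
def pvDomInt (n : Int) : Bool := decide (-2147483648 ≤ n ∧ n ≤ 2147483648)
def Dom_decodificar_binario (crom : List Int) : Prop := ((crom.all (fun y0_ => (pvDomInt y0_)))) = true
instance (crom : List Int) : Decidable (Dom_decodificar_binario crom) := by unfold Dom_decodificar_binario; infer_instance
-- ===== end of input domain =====

-- B replaces A's single interleaved bucketing loop over a mutable dict with three
-- independent filtering passes over range(39), one per bucket (objective: alternative).

-- ===== PORT A =====
-- literal transliteration: dict {'A':[],'B':[],'C':[]}, one loop over range(39),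
-- append i to the matching bucket via in-place mutation (Dict.modify).
def decodificar_binario (crom : List Int) : List (String × List Int) :=
  let init : PySem.Dict String (List Int) :=
    PySem.Dict.ofList [("A", []), ("B", []), ("C", [])]
  let d := (PySem.List.pyRange 0 39 1).foldl (fun d i =>
    let bits := PySem.List.slice crom (some (i * 2)) (some (i * 2 + 2))
    if bits = [1, 0] then d.modify "A" [] (· ++ [i])
    else if bits = [0, 1] then d.modify "B" [] (· ++ [i])
    else d.modify "C" [] (· ++ [i])) init
  d.items

-- ===== PORT B =====
-- literal transliteration of Source B: three comprehensions over range(39).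
def decodificar_binario_alt (crom : List Int) : List (String × List Int) :=
  [("A", (PySem.List.pyRange 0 39 1).filter
      (fun i => PySem.List.slice crom (some (2 * i)) (some (2 * i + 2)) = [1, 0])),
   ("B", (PySem.List.pyRange 0 39 1).filter
      (fun i => PySem.List.slice crom (some (2 * i)) (some (2 * i + 2)) = [0, 1])),
   ("C", (PySem.List.pyRange 0 39 1).filter
      (fun i => PySem.List.slice crom (some (2 * i)) (some (2 * i + 2)) ≠ [1, 0] ∧
                PySem.List.slice crom (some (2 * i)) (some (2 * i + 2)) ≠ [0, 1]))]

-- ===== PRECONDITION & SPEC =====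
def Spec_decodificar_binario (crom : List Int) (out : List (String × List Int)) : Prop := out = decodificar_binario_alt crom
instance (crom : List Int) (out : List (String × List Int)) : Decidable (Spec_decodificar_binario crom out) := by unfold Spec_decodificar_binario; infer_instance

-- ===== CLAIM (what is proved, stated in full; the proofs are below) =====
def Claim_equal_decodificar_binario : Prop := ∀ (crom : List Int), Dom_decodificar_binario crom → Spec_decodificar_binario crom (decodificar_binario crom)

-- ===== LEMMAS AND PROOFS =====

-- loop invariant: A's fold over any index list, started from buckets (la, lb, lc),
-- appends exactly the three filters of that list.
theorem pvLoopItems (crom : List Int) (l : List Int) : ∀ (la lb lc : List Int),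
    ((l.foldl (fun d i =>
      let bits := PySem.List.slice crom (some (i * 2)) (some (i * 2 + 2))
      if bits = [1, 0] then d.modify "A" [] (· ++ [i])
      else if bits = [0, 1] then d.modify "B" [] (· ++ [i])
      else d.modify "C" [] (· ++ [i]))
      (PySem.Dict.mk [("A", la), ("B", lb), ("C", lc)])).items) =
    [("A", la ++ l.filter
        (fun i => PySem.List.slice crom (some (2 * i)) (some (2 * i + 2)) = [1, 0])),
     ("B", lb ++ l.filter
        (fun i => PySem.List.slice crom (some (2 * i)) (some (2 * i + 2)) = [0, 1])),
     ("C", lc ++ l.filter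
        (fun i => PySem.List.slice crom (some (2 * i)) (some (2 * i + 2)) ≠ [1, 0] ∧
                  PySem.List.slice crom (some (2 * i)) (some (2 * i + 2)) ≠ [0, 1]))] := by
  induction l with
  | nil => intro la lb lc; simp
  | cons i t ih =>
    intro la lb lc
    simp only [List.foldl_cons, List.filter_cons]
    have h2 : i * 2 = 2 * i := by ring
    by_cases hA : PySem.List.slice crom (some (i * 2)) (some (i * 2 + 2)) = [1, 0]
    · have hA' : PySem.List.slice crom (some (2 * i)) (some (2 * i + 2)) = [1, 0] := h2 ▸ hA
      have hm : ((PySem.Dict.mk [("A", la), ("B", lb), ("C", lc)]).modify "A" [] (· ++ [i]))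
          = PySem.Dict.mk [("A", la ++ [i]), ("B", lb), ("C", lc)] := rfl
      rw [if_pos hA, hm, ih]
      simp [hA']
    · have hA' : ¬ PySem.List.slice crom (some (2 * i)) (some (2 * i + 2)) = [1, 0] := h2 ▸ hA
      by_cases hB : PySem.List.slice crom (some (i * 2)) (some (i * 2 + 2)) = [0, 1]
      · have hB' : PySem.List.slice crom (some (2 * i)) (some (2 * i + 2)) = [0, 1] := h2 ▸ hB
        have hm : ((PySem.Dict.mk [("A", la), ("B", lb), ("C", lc)]).modify "B" [] (· ++ [i]))
            = PySem.Dict.mk [("A", la), ("B", lb ++ [i]), ("C", lc)] := rfl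
        rw [if_neg hA, if_pos hB, hm, ih]
        simp [hB']
      · have hB' : ¬ PySem.List.slice crom (some (2 * i)) (some (2 * i + 2)) = [0, 1] := h2 ▸ hB
        have hm : ((PySem.Dict.mk [("A", la), ("B", lb), ("C", lc)]).modify "C" [] (· ++ [i]))
            = PySem.Dict.mk [("A", la), ("B", lb), ("C", lc ++ [i])] := rfl
        rw [if_neg hA, if_neg hB, hm, ih]
        simp [hA', hB']

-- ===== VERDICT (by name: the statement is the Claim_ definition above) =====
theorem decodificar_binario_spec : Claim_equal_decodificar_binario := by
  intro crom _
  show decodificar_binario crom = decodificar_binario_alt crom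
  unfold decodificar_binario decodificar_binario_alt
  have hinit : (PySem.Dict.ofList [("A", ([] : List Int)), ("B", []), ("C", [])])
      = PySem.Dict.mk [("A", []), ("B", []), ("C", [])] := rfl
  simp only [hinit, pvLoopItems crom (PySem.List.pyRange 0 39 1), List.nil_append]
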